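-- pv_equiv track=rewrite | github.com/michaelhutchings-napier/NiFi-Fabric | hack/gitlab-flow-registry-mock.py | _project_repository_path_matches
-- ===== SOURCE A (Python) =====
-- def _project_repository_path_matches(path, suffix):
--     prefixes = {
--         "/api/v4/projects/123",
--         "/api/v4/projects/example-group%2Fnifi-flows",
--         "/api/v4/projects/example%2Dgroup%2Fnifi%2Dflows",
--         "/api/v4/projects/example-group/nifi-flows",
--     }
--     return any(path == f"{prefix}{suffix}" for prefix in prefixes)
-- ===== SOURCE B (Python) =====
-- def _project_repository_path_matches(path, suffix):
--     prefixes = {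
--         "/api/v4/projects/123",
--         "/api/v4/projects/example-group%2Fnifi-flows",
--         "/api/v4/projects/example%2Dgroup%2Fnifi%2Dflows",
--         "/api/v4/projects/example-group/nifi-flows",
--     }
--     return path.endswith(suffix) and path[:len(path) - len(suffix)] in prefixes
-- ===== Notes on version B (the rewrite author's own statement) =====
-- stated objective: simpler
-- what changed: Instead of building four prefix+suffix candidate strings and scanning them for an equality match, B strips the known suffix off the path once (after an endswith test) and does a single set-membership lookup of the remaining prefix.
import Mathlib
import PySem

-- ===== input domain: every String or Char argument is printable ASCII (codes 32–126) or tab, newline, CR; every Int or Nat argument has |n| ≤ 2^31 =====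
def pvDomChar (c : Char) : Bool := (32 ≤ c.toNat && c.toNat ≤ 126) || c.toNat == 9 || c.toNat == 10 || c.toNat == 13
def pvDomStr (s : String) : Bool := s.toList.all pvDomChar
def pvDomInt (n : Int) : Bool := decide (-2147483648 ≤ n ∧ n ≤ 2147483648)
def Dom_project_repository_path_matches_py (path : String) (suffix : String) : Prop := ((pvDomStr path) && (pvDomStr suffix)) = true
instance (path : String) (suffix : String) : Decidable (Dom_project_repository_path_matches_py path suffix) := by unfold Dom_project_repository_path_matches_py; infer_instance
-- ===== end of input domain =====

-- B: instead of building four prefix+suffix candidates and scanning for equality,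
-- strip the suffix off the path once (endswith + slice) and look the prefix up in the set; objective: simpler.


-- ===== PORT A =====
-- the set literal of four prefixes (shared verbatim by both ports)
def pvPrefixesA : PySem.Set String := PySem.Set.ofList
  [ "/api/v4/projects/123",
    "/api/v4/projects/example-group%2Fnifi-flows",
    "/api/v4/projects/example%2Dgroup%2Fnifi%2Dflows",
    "/api/v4/projects/example-group/nifi-flows" ]

def project_repository_path_matches_py (path : String) (suffix : String) : Bool :=
  -- any(path == f"{prefix}{suffix}" for prefix in prefixes)
  List.any pvPrefixesA (fun pre => path == pre ++ suffix)

-- ===== PORT B =====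
def project_repository_path_matches_py_alt (path : String) (suffix : String) : Bool :=
  -- path.endswith(suffix) and path[:len(path) - len(suffix)] in prefixes
  PySem.Str.endswith path suffix &&
    List.contains pvPrefixesA (PySem.Str.slice path none (some (PySem.Str.len path - PySem.Str.len suffix)))

-- ===== PRECONDITION & SPEC =====
def Spec_project_repository_path_matches_py (path : String) (suffix : String) (out : Bool) : Prop := out = project_repository_path_matches_py_alt path suffix
instance (path : String) (suffix : String) (out : Bool) : Decidable (Spec_project_repository_path_matches_py path suffix out) := by unfold Spec_project_repository_path_matches_py; infer_instance

-- ===== CLAIM (what is proved, stated in full; the proofs are below) =====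
def Claim_equal_project_repository_path_matches_py : Prop := ∀ (path : String) (suffix : String), Dom_project_repository_path_matches_py path suffix → Spec_project_repository_path_matches_py path suffix (project_repository_path_matches_py path suffix)

-- ===== LEMMAS AND PROOFS =====

-- path = p ++ suffix  ↔  suffix is a suffix of path and stripping it leaves p
lemma pv_strip_iff (path suffix p : String) :
    path = p ++ suffix ↔
      (suffix.toList <:+ path.toList ∧
        PySem.Str.slice path none (some (PySem.Str.len path - PySem.Str.len suffix)) = p) := by
  constructor
  · rintro rfl
    refine ⟨⟨p.toList, by simp⟩, ?_⟩
    apply String.toList_inj.mp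
    rw [PySem.Str.toList_slice]
    simp only [PySem.Str.len_eq, String.toList_append, List.length_append]
    have : ((p.toList.length + suffix.toList.length : Nat) : Int) - suffix.toList.length
        = ((p.toList.length : Nat) : Int) := by push_cast; ring
    rw [PySem.Chars.slice_eq_listSlice, this, PySem.List.slice_to_natCast]
    simp
  · rintro ⟨⟨t, ht⟩, hs⟩
    apply String.toList_inj.mp
    have hlen : suffix.toList.length ≤ path.toList.length := by
      rw [← ht]; simp
    have hstr : (PySem.Str.slice path none
        (some (PySem.Str.len path - PySem.Str.len suffix))).toList = p.toList := by
      rw [hs]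
    rw [PySem.Str.toList_slice] at hstr
    simp only [PySem.Str.len_eq] at hstr
    have hcast : (path.toList.length : Int) - suffix.toList.length
        = ((path.toList.length - suffix.toList.length : Nat) : Int) := by
      push_cast [hlen]; ring
    rw [PySem.Chars.slice_eq_listSlice, hcast, PySem.List.slice_to_natCast] at hstr
    have htake : path.toList.take (path.toList.length - suffix.toList.length) = t := by
      rw [← ht]
      simp
    rw [htake] at hstr
    rw [String.toList_append, ← hstr, ← ht]

lemma pv_main (path suffix : String) :
    project_repository_path_matches_py path suffix
      = project_repository_path_matches_py_alt path suffix := by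
  rw [Bool.eq_iff_iff]
  unfold project_repository_path_matches_py project_repository_path_matches_py_alt
  simp only [List.any_eq_true, Bool.and_eq_true, List.contains_eq_mem, decide_eq_true_eq,
    beq_iff_eq, PySem.Str.endswith_eq, PySem.Chars.endswith_iff]
  constructor
  · rintro ⟨pre, hmem, heq⟩
    rw [pv_strip_iff] at heq
    exact ⟨heq.1, by rw [heq.2]; exact hmem⟩
  · rintro ⟨hsuf, hmem⟩
    exact ⟨_, hmem, (pv_strip_iff path suffix _).mpr ⟨hsuf, rfl⟩⟩

-- ===== VERDICT (by name: the statement is the Claim_ definition above) =====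
theorem project_repository_path_matches_py_spec : Claim_equal_project_repository_path_matches_py := by
  intro path suffix _
  unfold Spec_project_repository_path_matches_py
  exact pv_main path suffix
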